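-- pv_equiv track=rewrite | github.com/Dan-jpg2/CSIK_Prog | modul10/o0_to_o5.py | active_timespan_by_address
-- ===== SOURCE A (Python) =====
-- def active_timespan_by_address(transfers):
--     n = len(transfers)
--     d = {}
--     i = 0
--     while i < n:
--         timestamp, currency, amount, sender, receiver = transfers[i]
--
--         for addr in (sender, receiver):
--             if addr not in d:
--                 d[addr] = (timestamp, timestamp)
--             else:
--                 first, last = d[addr]
--                 if timestamp < first:
--                     first = timestamp
--                 if timestamp > last:
--                     last = timestamp
--                 d[addr] = (first, last)
--         i += 1
--     return d
-- ===== SOURCE B (Python) =====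
-- def active_timespan_by_address(transfers):
--     # collect-then-aggregate: group all timestamps per address, then take min/max
--     ts_by_addr = {}
--     for timestamp, currency, amount, sender, receiver in transfers:
--         for addr in (sender, receiver):
--             ts_by_addr.setdefault(addr, []).append(timestamp)
--     return {addr: (min(lst), max(lst)) for addr, lst in ts_by_addr.items()}
-- ===== Notes on version B (the rewrite author's own statement) =====
-- stated objective: alternative
-- what changed: Replaces the incremental running min/max dict update with a two-phase collect-then-aggregate: first group every timestamp under sender and receiver in a dict of lists, then build the result with min/max per address in a dict comprehension.
import Mathlib
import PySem

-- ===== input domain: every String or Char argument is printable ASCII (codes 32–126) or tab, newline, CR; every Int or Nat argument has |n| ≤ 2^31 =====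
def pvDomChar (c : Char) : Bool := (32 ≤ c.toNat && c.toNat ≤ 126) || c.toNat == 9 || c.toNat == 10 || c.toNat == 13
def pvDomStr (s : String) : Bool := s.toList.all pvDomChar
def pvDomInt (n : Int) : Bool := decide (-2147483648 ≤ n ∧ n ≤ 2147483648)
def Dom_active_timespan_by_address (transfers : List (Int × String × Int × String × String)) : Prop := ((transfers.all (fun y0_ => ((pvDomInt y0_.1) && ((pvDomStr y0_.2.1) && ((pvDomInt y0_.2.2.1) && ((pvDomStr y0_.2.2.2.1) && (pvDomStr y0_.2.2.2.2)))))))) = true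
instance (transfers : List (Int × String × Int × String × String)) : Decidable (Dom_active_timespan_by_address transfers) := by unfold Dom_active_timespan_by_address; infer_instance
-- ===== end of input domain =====

-- B changes the decomposition: collect all timestamps per address first, then aggregate with min/max.

-- ===== PORT A =====
def pvUpdA (d : PySem.Dict String (Int × Int)) (addr : String) (timestamp : Int) : PySem.Dict String (Int × Int) :=
  if d.contains addr = false then
    d.insert addr (timestamp, timestamp)
  else
    let fl := d.getD addr (0, 0)
    let first := if timestamp < fl.1 then timestamp else fl.1
    let last := if timestamp > fl.2 then timestamp else fl.2
    d.insert addr (first, last)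

def active_timespan_by_address (transfers : List (Int × String × Int × String × String)) : List (String × Int × Int) :=
  (transfers.foldl (fun d t =>
      [t.2.2.2.1, t.2.2.2.2].foldl (fun d addr => pvUpdA d addr t.1) d)
    PySem.Dict.empty).items

-- ===== PORT B =====
-- (min(lst), max(lst)); the lists are never empty when this is applied, the (0,0) arm is unreachable
def pvMinMax (lst : List Int) : Int × Int :=
  match PySem.List.min? lst (fun y => y), PySem.List.max? lst (fun y => y) with
  | some a, some b => (a, b)
  | _, _ => (0, 0)

def active_timespan_by_address_alt (transfers : List (Int × String × Int × String × String)) : List (String × Int × Int) :=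
  ((transfers.foldl (fun c t =>
      [t.2.2.2.1, t.2.2.2.2].foldl (fun c addr => c.modify addr [] (fun l => l ++ [t.1])) c)
    PySem.Dict.empty).items).map (fun p => (p.1, pvMinMax p.2))

-- ===== PRECONDITION & SPEC =====
def Spec_active_timespan_by_address (transfers : List (Int × String × Int × String × String)) (out : List (String × Int × Int)) : Prop := out = active_timespan_by_address_alt transfers
instance (transfers : List (Int × String × Int × String × String)) (out : List (String × Int × Int)) : Decidable (Spec_active_timespan_by_address transfers out) := by unfold Spec_active_timespan_by_address; infer_instance

-- ===== CLAIM (what is proved, stated in full; the proofs are below) =====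
def Claim_equal_active_timespan_by_address : Prop := ∀ (transfers : List (Int × String × Int × String × String)), Dom_active_timespan_by_address transfers → Spec_active_timespan_by_address transfers (active_timespan_by_address transfers)

-- ===== LEMMAS AND PROOFS =====
def pvFinish (c : PySem.Dict String (List Int)) : PySem.Dict String (Int × Int) :=
  PySem.Dict.mk (c.items.map (fun p => (p.1, pvMinMax p.2)))

def pvInv (c : PySem.Dict String (List Int)) : Prop :=
  (∀ p ∈ c.items, p.2 ≠ []) ∧ c.keys.Nodup

theorem pvContains_finish (c : PySem.Dict String (List Int)) (a : String) :
    (pvFinish c).contains a = c.contains a := by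
  simp [pvFinish, PySem.Dict.contains, List.any_map, Function.comp_def]

theorem pvKeys_finish (c : PySem.Dict String (List Int)) :
    (pvFinish c).keys = c.keys := by
  simp [pvFinish, PySem.Dict.keys, Function.comp]

theorem pvMinMax_singleton (t : Int) : pvMinMax [t] = (t, t) := by
  simp [pvMinMax, PySem.List.min?, PySem.List.max?]

theorem pvMinMax_append (l : List Int) (hl : l ≠ []) (t : Int) :
    pvMinMax (l ++ [t]) =
      (if t < (pvMinMax l).1 then t else (pvMinMax l).1,
       if t > (pvMinMax l).2 then t else (pvMinMax l).2) := by
  obtain ⟨x, tl, rfl⟩ := List.exists_cons_of_ne_nil hl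
  have h1 : pvMinMax (x :: tl) = (tl.foldl min x, tl.foldl max x) := by
    simp [pvMinMax, PySem.List.min?_id_cons, PySem.List.max?_id_cons]
  have h2 : pvMinMax ((x :: tl) ++ [t]) =
      (min (tl.foldl min x) t, max (tl.foldl max x) t) := by
    simp only [List.cons_append]
    simp [pvMinMax, PySem.List.min?_id_cons, PySem.List.max?_id_cons, List.foldl_append]
  rw [h1, h2]
  have hmin : min (tl.foldl min x) t = if t < tl.foldl min x then t else tl.foldl min x := by
    rw [min_def]; split_ifs <;> omega
  have hmax : max (tl.foldl max x) t = if t > tl.foldl max x then t else tl.foldl max x := by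
    rw [max_def]; split_ifs <;> omega
  simp [hmin, hmax]

theorem pvValue_of_mem (c : PySem.Dict String (List Int)) (hn : c.keys.Nodup)
    {a : String} {l : List Int} (hget : c.get? a = some l)
    {p : String × List Int} (hp : p ∈ c.items) (ha : p.1 = a) : p.2 = l := by
  have : c.get? a = some p.2 := by
    have : (a, p.2) ∈ c.items := by
      rw [← ha]; exact hp
    exact PySem.Dict.get?_of_mem_items c this hn
  rw [hget] at this
  exact (Option.some.injEq _ _ ▸ this).symm

-- one per-address update commutes with pvFinish
theorem pvStep (c : PySem.Dict String (List Int)) (hinv : pvInv c) (a : String) (t : Int) :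
    pvUpdA (pvFinish c) a t = pvFinish (c.modify a [] (fun l => l ++ [t])) := by
  obtain ⟨h1, h2⟩ := hinv
  unfold PySem.Dict.modify
  by_cases hc : c.contains a = true
  · -- existing key
    obtain ⟨l, hl⟩ : ∃ l, c.get? a = some l := by
      cases hgl : c.get? a with
      | none =>
        exfalso
        have := (PySem.Dict.get?_eq_none_iff_contains (d := c) (k := a)).mp hgl
        rw [hc] at this; exact Bool.true_eq_false.mp this
      | some l => exact ⟨l, rfl⟩
    have hlne : l ≠ [] := h1 _ (PySem.Dict.mem_items_of_get?_eq_some c hl)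
    have hgd : c.getD a [] = l := PySem.Dict.getD_of_get?_eq_some c [] hl
    have hmem : (a, pvMinMax l) ∈ (pvFinish c).items := by
      simp only [pvFinish]
      exact List.mem_map.mpr ⟨(a, l), PySem.Dict.mem_items_of_get?_eq_some c hl, rfl⟩
    have hfn : (pvFinish c).keys.Nodup := by rw [pvKeys_finish]; exact h2
    have hgf : (pvFinish c).getD a (0, 0) = pvMinMax l :=
      PySem.Dict.getD_of_get?_eq_some _ (0, 0) (PySem.Dict.get?_of_mem_items _ hmem hfn)
    have hcf : (pvFinish c).contains a = true := by rw [pvContains_finish]; exact hc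
    simp only [pvUpdA, hcf, hgf, hgd, Bool.true_eq_false, if_false]
    apply PySem.Dict.ext
    rw [PySem.Dict.items_insert_of_contains _ _ hcf]
    have hrhs : (pvFinish (c.insert a (l ++ [t]))).items
        = (c.insert a (l ++ [t])).items.map (fun p => (p.1, pvMinMax p.2)) := rfl
    rw [hrhs, PySem.Dict.items_insert_of_contains _ _ hc]
    have hlhs : (pvFinish c).items = c.items.map (fun p => (p.1, pvMinMax p.2)) := rfl
    rw [hlhs]
    simp only [List.map_map]
    apply List.map_congr_left
    intro p hp
    by_cases hpa : p.1 = a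
    · have hpl : p.2 = l := pvValue_of_mem c h2 hl hp hpa
      simp [Function.comp, hpa, pvMinMax_append l hlne t]
    · simp [Function.comp, hpa]
  · -- new key
    have hcb : c.contains a = false := by
      cases h : c.contains a with
      | false => rfl
      | true => exact absurd h hc
    have hcf : (pvFinish c).contains a = false := by rw [pvContains_finish]; exact hcb
    have hgd : c.getD a [] = [] := PySem.Dict.getD_of_not_contains c [] hcb
    simp only [pvUpdA, hcf, if_pos]
    apply PySem.Dict.ext
    rw [PySem.Dict.items_insert_of_not_contains _ _ hcf]
    have hrhs : (pvFinish (c.insert a (c.getD a [] ++ [t]))).items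
        = (c.insert a (c.getD a [] ++ [t])).items.map (fun p => (p.1, pvMinMax p.2)) := rfl
    rw [hrhs, PySem.Dict.items_insert_of_not_contains _ _ hcb]
    have hlhs : (pvFinish c).items = c.items.map (fun p => (p.1, pvMinMax p.2)) := rfl
    rw [hlhs]
    simp [hgd, pvMinMax_singleton]

theorem pvInv_modify (c : PySem.Dict String (List Int)) (hinv : pvInv c) (a : String) (t : Int) :
    pvInv (c.modify a [] (fun l => l ++ [t])) := by
  obtain ⟨h1, h2⟩ := hinv
  unfold PySem.Dict.modify
  by_cases hc : c.contains a = true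
  · constructor
    · intro p hp
      rw [PySem.Dict.items_insert_of_contains _ _ hc] at hp
      obtain ⟨q, hq, hqe⟩ := List.mem_map.mp hp
      by_cases hqa : (q.1 == a) = true
      · simp only [hqa, if_pos] at hqe
        subst hqe
        simp
      · simp only [hqa] at hqe
        simp only [Bool.false_eq_true, if_false] at hqe
        subst hqe
        exact h1 q hq
    · have : (c.insert a ((fun l => l ++ [t]) (c.getD a []))).keys = c.keys := by
        exact PySem.Dict.keys_insert_of_contains _ _ hc
      rw [this]; exact h2
  · have hcb : c.contains a = false := by
      cases h : c.contains a with
      | false => rfl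
      | true => exact absurd h hc
    constructor
    · intro p hp
      rw [PySem.Dict.items_insert_of_not_contains _ _ hcb] at hp
      rcases List.mem_append.mp hp with h | h
      · exact h1 p h
      · have hgd : c.getD a [] = [] := PySem.Dict.getD_of_not_contains c [] hcb
        simp only [List.mem_singleton] at h
        subst h
        simp [hgd]
    · rw [PySem.Dict.keys_insert_of_not_contains _ _ hcb]
      have hna : a ∉ c.keys := by
        intro hmem
        have := (PySem.Dict.contains_iff_mem_keys (d := c) (k := a)).mpr hmem
        rw [hcb] at this; exact Bool.false_eq_true.mp this
      refine List.Nodup.append h2 (List.nodup_singleton a) ?_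
      intro x hx hy
      simp only [List.mem_singleton] at hy
      subst hy
      exact hna hx

theorem pvFold (rows : List (Int × String × Int × String × String))
    (c : PySem.Dict String (List Int)) (hinv : pvInv c) :
    rows.foldl (fun d t => [t.2.2.2.1, t.2.2.2.2].foldl (fun d addr => pvUpdA d addr t.1) d)
        (pvFinish c)
      = pvFinish (rows.foldl (fun c t =>
          [t.2.2.2.1, t.2.2.2.2].foldl (fun c addr => c.modify addr [] (fun l => l ++ [t.1])) c) c) := by
  induction rows generalizing c with
  | nil => rfl
  | cons r rs ih =>
    simp only [List.foldl]
    rw [pvStep c hinv, pvStep _ (pvInv_modify c hinv _ _)]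
    exact ih _ (pvInv_modify _ (pvInv_modify c hinv _ _) _ _)

theorem pvInv_empty : pvInv (PySem.Dict.empty : PySem.Dict String (List Int)) := by
  constructor
  · intro p hp; cases hp
  · exact List.nodup_nil

-- ===== VERDICT (by name: the statement is the Claim_ definition above) =====
theorem active_timespan_by_address_spec : Claim_equal_active_timespan_by_address := by
  intro transfers _
  unfold Spec_active_timespan_by_address active_timespan_by_address active_timespan_by_address_alt
  have h0 : (pvFinish PySem.Dict.empty) = (PySem.Dict.empty : PySem.Dict String (Int × Int)) := rfl
  rw [← h0, pvFold transfers PySem.Dict.empty pvInv_empty]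
  rfl
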